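-- pv_equiv track=rewrite | github.com/IanAguiar-ai/compressor_binario | python/frequentist_compressor.py | number_of_repetition
-- ===== SOURCE A (Python) =====
-- def number_of_repetition(text:str) -> int:
--     """
--     Count repetition of character
--     """
--     repetition:int = 0
--     for i in range(1, len(text)):
--         if text[0] == text[i]:
--             repetition += 1
--         else:
--             return repetition
--     return repetition
-- ===== SOURCE B (Python) =====
-- def number_of_repetition(text: str) -> int:
--     if not text:
--         return 0
--     return len(text) - len(text.lstrip(text[0])) - 1
-- ===== Notes on version B (the rewrite author's own statement) =====
-- stated objective: simpler
-- what changed: Replaces the index loop with early return by a closed-form length difference: the leading run is measured as len(text) - len(text.lstrip(text[0])), then 1 is subtracted.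
import Mathlib
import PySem

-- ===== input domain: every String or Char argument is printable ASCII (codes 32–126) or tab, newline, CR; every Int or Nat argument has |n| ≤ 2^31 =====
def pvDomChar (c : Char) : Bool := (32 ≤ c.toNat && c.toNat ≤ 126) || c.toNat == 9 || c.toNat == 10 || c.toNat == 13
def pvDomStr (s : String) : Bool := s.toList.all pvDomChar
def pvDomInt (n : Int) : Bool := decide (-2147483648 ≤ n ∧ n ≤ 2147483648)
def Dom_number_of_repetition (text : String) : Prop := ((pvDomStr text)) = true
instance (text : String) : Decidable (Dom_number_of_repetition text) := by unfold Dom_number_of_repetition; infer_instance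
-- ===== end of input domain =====

-- B replaces A's index loop (early return on first mismatch) by a closed-form
-- length difference via lstrip; objective: simpler.


-- ===== PORT A =====
-- the 'for i in range(1, len(text))' loop: walks the tail, accumulator 'repetition',
-- early return on the first mismatch
def nrLoopA (c : Char) (rest : List Char) (repetition : Int) : Int :=
  match rest with
  | [] => repetition
  | x :: xs => if c == x then nrLoopA c xs (repetition + 1) else repetition

def number_of_repetition (text : String) : Int :=
  match text.toList with
  | [] => 0                       -- range(1, 0) is empty, returns repetition = 0
  | c :: rest => nrLoopA c rest 0

-- ===== PORT B =====
-- text.lstrip(text[0]) ported by hand as dropWhile (· == c): exact, since the strip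
-- set is the single character c
def number_of_repetition_alt (text : String) : Int :=
  match text.toList with
  | [] => 0
  | c :: _ =>
      (text.toList.length : Int) - ((text.toList.dropWhile (· == c)).length : Int) - 1

-- ===== PRECONDITION & SPEC =====
def Spec_number_of_repetition (text : String) (out : Int) : Prop := out = number_of_repetition_alt text
instance (text : String) (out : Int) : Decidable (Spec_number_of_repetition text out) := by unfold Spec_number_of_repetition; infer_instance

-- ===== CLAIM (what is proved, stated in full; the proofs are below) =====
def Claim_equal_number_of_repetition : Prop := ∀ (text : String), Dom_number_of_repetition text → Spec_number_of_repetition text (number_of_repetition text)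

-- ===== LEMMAS AND PROOFS =====
theorem nrLoopA_eq_takeWhile (c : Char) (xs : List Char) (r : Int) :
    nrLoopA c xs r = r + ((xs.takeWhile (· == c)).length : Int) := by
  induction xs generalizing r with
  | nil => simp [nrLoopA]
  | cons x xs ih =>
      rw [show nrLoopA c (x :: xs) r = if c == x then nrLoopA c xs (r + 1) else r from rfl]
      by_cases h : x = c
      · subst h
        rw [if_pos (beq_self_eq_true _), ih]
        simp only [List.takeWhile_cons, beq_self_eq_true, if_true, List.length_cons]
        push_cast
        ring
      · have h1 : (c == x) = false := beq_eq_false_iff_ne.mpr (Ne.symm h)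
        have h2 : (x == c) = false := beq_eq_false_iff_ne.mpr h
        rw [if_neg (by simp [h1]), List.takeWhile_cons, h2]
        simp

theorem len_takeWhile_add_dropWhile (p : Char → Bool) (xs : List Char) :
    (xs.takeWhile p).length + (xs.dropWhile p).length = xs.length := by
  rw [← List.length_append, List.takeWhile_append_dropWhile]

-- ===== VERDICT (by name: the statement is the Claim_ definition above) =====
theorem number_of_repetition_spec : Claim_equal_number_of_repetition := by
  unfold Claim_equal_number_of_repetition
  intro text _
  unfold Spec_number_of_repetition number_of_repetition number_of_repetition_alt
  cases hts : text.toList with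
  | nil => simp
  | cons c rest =>
      have hdw : (c :: rest).dropWhile (· == c) = rest.dropWhile (· == c) := by
        simp [List.dropWhile]
      have hlen := len_takeWhile_add_dropWhile (· == c) rest
      simp only [nrLoopA_eq_takeWhile, hdw, List.length_cons]
      omega
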